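-- pv_equiv track=rewrite | github.com/grzesikluk/projecteuler | src/main/java/eulerproject/level5/problem116/solution.py | createNewArraysGeneration
-- ===== SOURCE A (Python) =====
-- def getArrayIndexesToFragment(array, chunk_size):
--     """
--     Return list of tuples (from, to) of indexes - indicating parts of array that can be fragmented.
--     :param array:
--     :param chunk_size:
--     :return: Indexes tuples list [(from,to),...]
--     """
--     indexes = []
--
--     for i in range(len(array)):
--         if array[i:i + chunk_size] == [0] * chunk_size:
--             indexes.append((i, i + chunk_size - 1))
--
--     return indexes
--
-- def createNewArraysGeneration(array, chunk_size):
--     n = max(array) + 1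
--     result_list = []
--
--     for indexes in getArrayIndexesToFragment(array, chunk_size):
--         new_array = array[:]
--         for i in range(indexes[0], indexes[1] + 1):
--             new_array[i] = n
--         result_list.append(new_array)
--
--     return result_list
-- ===== SOURCE B (Python) =====
-- def createNewArraysGeneration(array, chunk_size):
--     n = max(array) + 1
--     result = []
--     run = 0
--     for j, v in enumerate(array):
--         run = run + 1 if v == 0 else 0
--         if run >= chunk_size:
--             i = j - chunk_size + 1
--             result.append(array[:i] + [n] * chunk_size + array[j + 1:])
--     return result
-- ===== Notes on version B (the rewrite author's own statement) =====
-- stated objective: faster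
-- what changed: Replaces the per-index slice comparison (a fresh chunk_size-length slice equality test at every position) and the index-by-index in-place fill with a single left-to-right pass that keeps a running count of consecutive zeros and, when the count reaches chunk_size, emits array[:i] + [n]*chunk_size + array[j+1:] directly.
-- outside the precondition, e.g. on createNewArraysGeneration([0, 1], -1): A returns [[0, 1]], B returns [[0, 1, 1], [0, 1]]; on createNewArraysGeneration([], 2): A raises ValueError, B raises ValueError
import Mathlib
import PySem

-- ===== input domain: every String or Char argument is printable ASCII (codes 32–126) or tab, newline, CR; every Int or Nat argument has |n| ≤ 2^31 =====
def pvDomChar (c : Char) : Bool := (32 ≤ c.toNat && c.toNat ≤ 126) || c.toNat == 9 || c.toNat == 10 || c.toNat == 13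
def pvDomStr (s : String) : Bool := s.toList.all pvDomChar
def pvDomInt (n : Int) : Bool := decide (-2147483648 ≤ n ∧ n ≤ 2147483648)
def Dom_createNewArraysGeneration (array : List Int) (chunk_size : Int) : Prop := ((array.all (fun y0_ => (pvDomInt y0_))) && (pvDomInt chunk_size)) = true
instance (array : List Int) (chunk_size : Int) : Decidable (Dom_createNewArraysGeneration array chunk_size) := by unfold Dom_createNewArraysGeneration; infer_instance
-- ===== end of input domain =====

-- B replaces A's per-index slice comparison with a single pass keeping a running count of
-- consecutive zeros, emitting each copy as take ++ replicate ++ drop (return values proved equal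
-- for nonempty arrays and chunk_size >= 0).


-- ===== PORT A =====
-- getArrayIndexesToFragment: scan every start index i, compare the slice array[i:i+chunk_size]
-- against [0]*chunk_size, collect (i, i+chunk_size-1).
def pvFrag (array : List Int) (chunk_size : Int) : List (Int × Int) :=
  (PySem.List.pyRange 0 (array.length : Int) 1).foldl
    (fun acc i =>
      if PySem.List.slice array (some i) (some (i + chunk_size)) = List.replicate chunk_size.toNat (0 : Int) then
        acc ++ [(i, i + chunk_size - 1)]
      else acc)
    []

def createNewArraysGeneration (array : List Int) (chunk_size : Int) : List (List Int) :=
  match PySem.List.max? array (fun x => x) with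
  | none => []
  | some m =>
    let n := m + 1
    (pvFrag array chunk_size).foldl
      (fun res idxs =>
        res ++ [(PySem.List.pyRange idxs.1 (idxs.2 + 1) 1).foldl
                  (fun na i => PySem.List.pySetD na i n) array])
      []


-- ===== PORT B =====
def createNewArraysGeneration_alt (array : List Int) (chunk_size : Int) : List (List Int) :=
  match PySem.List.max? array (fun x => x) with
  | none => []
  | some m =>
    let n := m + 1
    ((PySem.List.enumerate array 0).foldl
      (fun (st : Int × List (List Int)) jv =>
        let run : Int := if jv.2 = 0 then st.1 + 1 else 0
        if chunk_size ≤ run then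
          (run, st.2 ++ [PySem.List.slice array none (some (jv.1 - chunk_size + 1))
                          ++ List.replicate chunk_size.toNat n
                          ++ PySem.List.slice array (some (jv.1 + 1)) none])
        else (run, st.2))
      ((0 : Int), ([] : List (List Int)))).2


-- ===== PRECONDITION & SPEC =====
-- Pre_ is the task's natural domain: a nonempty array (Python's max raises ValueError on []) and a
-- nonnegative chunk_size (for negative chunk_size A's slice endpoint wraps around via Python's
-- negative slice indexing and A emits an accidental number of untouched copies; B does not mirror that).
def Pre_createNewArraysGeneration (array : List Int) (chunk_size : Int) : Prop :=
  array ≠ [] ∧ 0 ≤ chunk_size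
instance (array : List Int) (chunk_size : Int) : Decidable (Pre_createNewArraysGeneration array chunk_size) := by
  unfold Pre_createNewArraysGeneration; infer_instance

def pvWitness_createNewArraysGeneration : List Int × Int := ([0, 0, 1], 2)

def Spec_createNewArraysGeneration (array : List Int) (chunk_size : Int) (out : List (List Int)) : Prop := out = createNewArraysGeneration_alt array chunk_size
instance (array : List Int) (chunk_size : Int) (out : List (List Int)) : Decidable (Spec_createNewArraysGeneration array chunk_size out) := by unfold Spec_createNewArraysGeneration; infer_instance

-- ===== CLAIM (what is proved, stated in full; the proofs are below) =====
def Claim_equal_createNewArraysGeneration : Prop := ∀ (array : List Int) (chunk_size : Int), Dom_createNewArraysGeneration array chunk_size → Pre_createNewArraysGeneration array chunk_size → Spec_createNewArraysGeneration array chunk_size (createNewArraysGeneration array chunk_size)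

-- ===== LEMMAS AND PROOFS =====

def pvWinA (array : List Int) (cn : Nat) (k : Nat) : Bool :=
  decide ((array.drop k).take cn = List.replicate cn (0 : Int))

theorem pvWinA_bound (array : List Int) (cn k : Nat) (hk : k ≤ array.length)
    (h : pvWinA array cn k = true) : k + cn ≤ array.length := by
  unfold pvWinA at h
  have h' := of_decide_eq_true h
  have := congrArg List.length h'
  simp at this
  omega

def pvWend (array : List Int) (cn j : Nat) : Bool :=
  decide (cn ≤ j + 1) && decide ((array.drop (j + 1 - cn)).take cn = List.replicate cn (0 : Int))

def pvEmit (array : List Int) (cn : Nat) (n : Int) (j : Nat) : List Int :=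
  array.take (j + 1 - cn) ++ List.replicate cn n ++ array.drop (j + 1)

def pvCanon (array : List Int) (cn : Nat) (n : Int) : List (List Int) :=
  ((List.range array.length).filter (pvWend array cn)).map (pvEmit array cn n)

theorem pvFrag_eq (array : List Int) (cn : Nat) :
    pvFrag array (cn : Int)
    = (((List.range array.length).filter (pvWinA array cn)).map
        (fun (k : Nat) => ((k : Int), (k : Int) + (cn : Int) - 1))) := by
  unfold pvFrag
  have hb : (fun (acc : List (Int × Int)) (i : Int) =>
        if PySem.List.slice array (some i) (some (i + (cn : Int))) = List.replicate ((cn : Int)).toNat (0 : Int) then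
          acc ++ [(i, i + (cn : Int) - 1)]
        else acc)
      = (fun acc i =>
          if (fun i => decide (PySem.List.slice array (some i) (some (i + (cn : Int))) = List.replicate ((cn : Int)).toNat (0 : Int))) i = true then
            acc ++ [(fun (i : Int) => (i, i + (cn : Int) - 1)) i]
          else acc) := by
    funext acc i
    simp only [decide_eq_true_eq]
  rw [hb, PySem.List.foldl_append_if]
  rw [show ((array.length : Int)) = ((array.length : Nat) : Int) from rfl, PySem.List.pyRange_zero_nat]
  rw [List.filter_map, List.map_map]
  have hfil : List.filter
        ((fun i => decide (PySem.List.slice array (some i) (some (i + (cn : Int))) = List.replicate ((cn : Int)).toNat (0 : Int))) ∘ (fun (k : Nat) => (k : Int)))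
        (List.range array.length)
      = List.filter (pvWinA array cn) (List.range array.length) := by
    apply List.filter_congr
    intro k hk
    simp only [Function.comp_apply, pvWinA, Int.toNat_natCast, PySem.List.slice_natCast_add]
  rw [hfil]
  simp [Function.comp]

theorem pvShift (array : List Int) (cn : Nat) (n : Int) :
    ((List.range array.length).filter (pvWinA array cn)).map
      (fun k => array.take k ++ List.replicate cn n ++ array.drop (k + cn))
    = pvCanon array cn n := by
  unfold pvCanon
  cases cn with
  | zero =>
    have h1 : (List.range array.length).filter (pvWinA array 0) = List.range array.length := by
      apply List.filter_eq_self.mpr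
      intro k _
      simp [pvWinA]
    have h2 : (List.range array.length).filter (pvWend array 0) = List.range array.length := by
      apply List.filter_eq_self.mpr
      intro k _
      simp [pvWend]
    rw [h1, h2]
    apply List.map_congr_left
    intro k _
    simp [pvEmit]
  | succ c =>
    have hlist : (List.range array.length).filter (pvWend array (c + 1))
        = ((List.range array.length).filter (pvWinA array (c + 1))).map (fun k => k + c) := by
      apply List.Perm.eq_of_pairwise (le := (· < ·))
      · intro a b _ _ h1 h2
        omega
      · exact List.Pairwise.filter _ List.pairwise_lt_range
      · rw [List.pairwise_map]
        exact (List.Pairwise.filter _ List.pairwise_lt_range).imp (by omega)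
      · apply (List.perm_ext_iff_of_nodup ?_ ?_).mpr
        · intro j
          simp only [List.mem_filter, List.mem_range, List.mem_map]
          constructor
          · rintro ⟨hj, hw⟩
            unfold pvWend at hw
            simp only [Bool.and_eq_true, decide_eq_true_eq] at hw
            refine ⟨j - c, ⟨⟨by omega, ?_⟩, by omega⟩⟩
            unfold pvWinA
            have : j + 1 - (c + 1) = j - c := by omega
            rw [this] at hw
            exact decide_eq_true hw.2
          · rintro ⟨k, ⟨⟨hk, hwin⟩, hj⟩⟩
            have hb := pvWinA_bound array (c + 1) k (by omega) hwin
            refine ⟨by omega, ?_⟩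
            unfold pvWend
            unfold pvWinA at hwin
            simp only [Bool.and_eq_true, decide_eq_true_eq]
            refine ⟨by omega, ?_⟩
            have : j + 1 - (c + 1) = k := by omega
            rw [this]
            exact of_decide_eq_true hwin
        · exact List.Nodup.filter _ List.nodup_range
        · exact List.Nodup.map (fun a b => by omega) (List.Nodup.filter _ List.nodup_range)
    rw [hlist, List.map_map]
    apply List.map_congr_left
    intro k hk
    simp only [Function.comp_apply, pvEmit]
    have e1 : k + c + 1 - (c + 1) = k := by omega
    have e2 : k + c + 1 = k + (c + 1) := by omega
    rw [e1, e2]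

theorem pvSetRange (n : Int) : ∀ (m a : Nat) (xs : List Int), a + m ≤ xs.length →
    (PySem.List.pyRange (a : Int) ((a : Int) + (m : Nat)) 1).foldl
      (fun na i => PySem.List.pySetD na i n) xs
    = xs.take a ++ List.replicate m n ++ xs.drop (a + m) := by
  intro m
  induction m with
  | zero =>
    intro a xs h
    rw [show ((a : Int) + ((0 : Nat) : Int)) = (a : Int) by push_cast; ring]
    rw [PySem.List.pyRange_one_eq_nil le_rfl]
    simp
  | succ m ih =>
    intro a xs h
    rw [PySem.List.pyRange_one_cons (by push_cast; omega)]
    rw [List.foldl_cons]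
    have hset : PySem.List.pySetD xs (a : Int) n = xs.set a n := by
      simp [PySem.List.pySetD_natCast]
    rw [hset]
    have hrange : (a : Int) + 1 = ((a + 1 : Nat) : Int) := by push_cast; ring
    have hrange2 : (a : Int) + ((m + 1 : Nat) : Int) = ((a + 1 : Nat) : Int) + ((m : Nat) : Int) := by push_cast; ring
    rw [hrange2, hrange]
    rw [ih (a + 1) (xs.set a n) (by simp; omega)]
    rw [List.drop_set_of_lt (hnm := by omega)]
    have htake : (xs.set a n).take (a + 1) = xs.take a ++ [n] := by
      rw [List.take_add_one, List.take_set, List.getElem?_set_self (by omega),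
          List.set_eq_of_length_le (by simp)]
      simp
    rw [htake]
    have haux : a + 1 + m = a + (m + 1) := by omega
    rw [haux]
    simp [List.replicate_succ]

theorem pvA_eq_canon (array : List Int) (chunk_size : Int) (m : Int)
    (hm : PySem.List.max? array (fun x => x) = some m) (hcs : 0 ≤ chunk_size) :
    createNewArraysGeneration array chunk_size = pvCanon array chunk_size.toNat (m + 1) := by
  obtain ⟨cn, hcn⟩ : ∃ cn : Nat, chunk_size = (cn : Int) := ⟨chunk_size.toNat, (Int.toNat_of_nonneg hcs).symm⟩
  subst hcn
  simp only [createNewArraysGeneration, hm, Int.toNat_natCast]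
  rw [pvFrag_eq, PySem.List.foldl_append_singleton_eq_map, List.map_map, ← pvShift array cn (m + 1)]
  apply List.map_congr_left
  intro k hk
  rw [List.mem_filter, List.mem_range] at hk
  obtain ⟨hkL, hwin⟩ := hk
  simp only [Function.comp_apply]
  have e1 : ((k : Int), (k : Int) + (cn : Int) - 1).2 + 1 = (k : Int) + (cn : Int) := by push_cast; ring
  rw [e1]
  have e2 : (k : Int) + (cn : Int) = (k : Int) + ((cn : Nat) : Int) := by norm_num
  rw [e2, pvSetRange (m + 1) cn k array (pvWinA_bound array cn k (by omega) hwin)]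

def pvTz (l : List Int) : Int := l.foldl (fun r v => if v = 0 then r + 1 else 0) 0

theorem pvTz_append_singleton (l : List Int) (v : Int) :
    pvTz (l ++ [v]) = if v = 0 then pvTz l + 1 else 0 := by
  simp [pvTz, List.foldl_append]

theorem pvTz_nonneg (l : List Int) : 0 ≤ pvTz l := by
  induction l using List.reverseRecOn with
  | nil => simp [pvTz]
  | append_singleton l v ih =>
    rw [pvTz_append_singleton]
    split <;> omega

theorem pvTz_ge_iff (l : List Int) (cn : Nat) :
    ((cn : Int) ≤ pvTz l) ↔ (cn ≤ l.length ∧ l.drop (l.length - cn) = List.replicate cn (0 : Int)) := by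
  induction l using List.reverseRecOn generalizing cn with
  | nil =>
    simp only [pvTz, List.foldl_nil, List.length_nil, List.drop_nil, Nat.le_zero]
    constructor
    · intro h
      have : cn = 0 := by omega
      simp [this]
    · rintro ⟨h, _⟩
      simp [h]
  | append_singleton l v ih =>
    rw [pvTz_append_singleton]
    cases cn with
    | zero =>
      have := pvTz_nonneg l
      simp
      split <;> omega
    | succ k =>
      have hlen : (l ++ [v]).length = l.length + 1 := by simp
      by_cases hv : v = 0
      · subst hv
        rw [if_pos rfl]
        have hstep : ((k + 1 : Nat) : Int) ≤ pvTz l + 1 ↔ ((k : Nat) : Int) ≤ pvTz l := by push_cast; omega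
        rw [hstep, ih k, hlen]
        have heq : l.length + 1 - (k + 1) = l.length - k := by omega
        rw [heq]
        constructor
        · rintro ⟨hk, hdrop⟩
          refine ⟨by omega, ?_⟩
          rw [List.drop_append_of_le_length (by omega), hdrop]
          simp [List.replicate_succ' (n := k)]
        · rintro ⟨hk, hdrop⟩
          have hk' : k ≤ l.length := by omega
          refine ⟨hk', ?_⟩
          rw [List.drop_append_of_le_length (by omega)] at hdrop
          rw [List.replicate_succ' (n := k)] at hdrop
          exact List.append_cancel_right hdrop
      · rw [if_neg hv]
        constructor
        · intro hle
          exfalso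
          have : (0:Int) ≤ (k:Int) := by positivity
          push_cast at hle
          omega
        · rintro ⟨hk, hdrop⟩
          rw [hlen] at hk hdrop
          exfalso
          apply hv
          have e1 : (List.drop (l.length + 1 - (k + 1)) (l ++ [v]))[k]? = some 0 := by
            rw [hdrop]; simp
          rw [List.getElem?_drop] at e1
          have heq : l.length + 1 - (k + 1) + k = l.length := by omega
          rw [heq] at e1
          have e2 : (l ++ [v])[l.length]? = some v := by simp
          rw [e1] at e2
          exact (Option.some_inj.mp e2).symm

theorem pvCond_iff (array pref rest : List Int) (v : Int) (cn : Nat)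
    (h : array = pref ++ (v :: rest)) :
    ((cn : Int) ≤ pvTz (pref ++ [v])) ↔ pvWend array cn pref.length = true := by
  have htake : pref ++ [v] = array.take (pref.length + 1) := by
    rw [h, List.take_append]
    simp
  rw [pvTz_ge_iff]
  unfold pvWend
  simp only [Bool.and_eq_true, decide_eq_true_eq]
  have hlen : (pref ++ [v]).length = pref.length + 1 := by simp
  rw [hlen]
  constructor
  · rintro ⟨hcn, hdrop⟩
    refine ⟨hcn, ?_⟩
    rw [htake, List.drop_take] at hdrop
    have : pref.length + 1 - (pref.length + 1 - cn) = cn := by omega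
    rwa [this] at hdrop
  · rintro ⟨hcn, hdrop⟩
    refine ⟨hcn, ?_⟩
    rw [htake, List.drop_take]
    have : pref.length + 1 - (pref.length + 1 - cn) = cn := by omega
    rwa [this]

theorem pvBfold (array : List Int) (cn : Nat) (n : Int) :
    ∀ (suffix pref : List Int) (out : List (List Int)), array = pref ++ suffix →
    ((PySem.List.enumerate suffix ((pref.length : Nat) : Int)).foldl
      (fun (st : Int × List (List Int)) jv =>
        let run : Int := if jv.2 = 0 then st.1 + 1 else 0
        if (cn : Int) ≤ run then
          (run, st.2 ++ [PySem.List.slice array none (some (jv.1 - (cn : Int) + 1))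
                          ++ List.replicate cn n
                          ++ PySem.List.slice array (some (jv.1 + 1)) none])
        else (run, st.2))
      (pvTz pref, out)).2
    = out ++ (((List.range suffix.length).map (fun k => pref.length + k)).filter
                (pvWend array cn)).map (pvEmit array cn n) := by
  intro suffix
  induction suffix with
  | nil =>
    intro pref out h
    simp [PySem.List.enumerate]
  | cons v rest ih =>
    intro pref out h
    rw [PySem.List.enumerate_cons, List.foldl_cons]
    dsimp only
    rw [show (if v = 0 then pvTz pref + 1 else 0) = pvTz (pref ++ [v]) from (pvTz_append_singleton pref v).symm]
    have hlen' : ((pref ++ [v]).length : Int) = (pref.length : Int) + 1 := by simp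
    have harr : array = (pref ++ [v]) ++ rest := by simp [h]
    have hrange : (List.range (v :: rest).length).map (fun k => pref.length + k)
        = pref.length :: (List.range rest.length).map (fun k => (pref ++ [v]).length + k) := by
      simp only [List.length_cons, List.range_succ_eq_map, List.map_cons, List.map_map, Nat.add_zero]
      congr 1
      apply List.map_congr_left
      intro k _
      simp [Function.comp, Nat.succ_eq_add_one, List.length_append]
      omega
    rw [hrange, List.filter_cons]
    by_cases hc : (cn : Int) ≤ pvTz (pref ++ [v])
    · rw [if_pos hc]
      have hw : pvWend array cn pref.length = true := (pvCond_iff array pref rest v cn h).mp hc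
      rw [hw]
      have hcnle : cn ≤ pref.length + 1 := by
        unfold pvWend at hw
        simp only [Bool.and_eq_true, decide_eq_true_eq] at hw
        exact hw.1
      rw [← hlen', ih (pref ++ [v]) _ harr]
      have hE : PySem.List.slice array none (some (((pref.length : Nat) : Int) - (cn : Int) + 1))
            ++ List.replicate cn n
            ++ PySem.List.slice array (some (((pref ++ [v]).length : Nat) : Int)) none
          = pvEmit array cn n pref.length := by
        have hcast1 : ((pref.length : Nat) : Int) - (cn : Int) + 1 = ((pref.length + 1 - cn : Nat) : Int) := by
          push_cast [hcnle]; omega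
        have hcast2 : (((pref ++ [v]).length : Nat) : Int) = ((pref.length + 1 : Nat) : Int) := by simp
        rw [hcast1, PySem.List.slice_to_natCast, hcast2, PySem.List.slice_from_natCast]
        rfl
      rw [hE]
      simp [List.append_assoc]
    · rw [if_neg hc]
      have hw : pvWend array cn pref.length = false := by
        rcases Bool.eq_false_or_eq_true (pvWend array cn pref.length) with h1 | h0
        · exact absurd ((pvCond_iff array pref rest v cn h).mpr h1) hc
        · exact h0
      rw [hw]
      rw [← hlen', ih (pref ++ [v]) _ harr]
      simp

theorem pvB_eq_canon (array : List Int) (chunk_size : Int) (m : Int)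
    (hm : PySem.List.max? array (fun x => x) = some m) (hcs : 0 ≤ chunk_size) :
    createNewArraysGeneration_alt array chunk_size = pvCanon array chunk_size.toNat (m + 1) := by
  obtain ⟨cn, hcn⟩ : ∃ cn : Nat, chunk_size = (cn : Int) := ⟨chunk_size.toNat, (Int.toNat_of_nonneg hcs).symm⟩
  subst hcn
  simp only [createNewArraysGeneration_alt, hm, Int.toNat_natCast]
  have hb := pvBfold array cn (m + 1) array [] [] (by simp)
  simp only [List.length_nil, Nat.cast_zero, List.nil_append] at hb
  rw [show pvTz ([] : List Int) = 0 from rfl] at hb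
  rw [hb]
  unfold pvCanon
  simp

-- ===== VERDICT (by name: the statement is the Claim_ definition above) =====
theorem createNewArraysGeneration_spec : Claim_equal_createNewArraysGeneration := by
  intro array chunk_size _ hpre
  obtain ⟨hne, hcs⟩ := hpre
  unfold Spec_createNewArraysGeneration
  cases hm : PySem.List.max? array (fun x => x) with
  | none => exact absurd ((PySem.List.max?_eq_none_iff array (fun x => x)).mp hm) hne
  | some m =>
    rw [pvA_eq_canon array chunk_size m hm hcs, pvB_eq_canon array chunk_size m hm hcs]
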